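-- pv_equiv track=rewrite | github.com/vicinx3/disease-outbreak | PHASE_1/TestScripts/geoloc/test_getPlaces.py | equal_ignore_order
-- ===== SOURCE A (Python) =====
-- def equal_ignore_order(a, b):
--     """ Use only when elements are neither hashable nor sortable! """
--     unmatched = list(b)
--     for element in a:
--         try:
--             unmatched.remove(element)
--         except ValueError:
--             return False
--     return not unmatched
-- ===== SOURCE B (Python) =====
-- def equal_ignore_order(a, b):
--     """ Use only when elements are neither hashable nor sortable! """
--     if len(a) != len(b):
--         return False
--     return all(a.count(x) == b.count(x) for x in a)
-- ===== Notes on version B (the rewrite author's own statement) =====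
-- stated objective: simpler
-- what changed: Replaces the copy-and-remove loop with exception-based early exit by a pure length check plus equality-based counting (all a.count(x) == b.count(x)); no mutation, no copy, no try/except.
import Mathlib
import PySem

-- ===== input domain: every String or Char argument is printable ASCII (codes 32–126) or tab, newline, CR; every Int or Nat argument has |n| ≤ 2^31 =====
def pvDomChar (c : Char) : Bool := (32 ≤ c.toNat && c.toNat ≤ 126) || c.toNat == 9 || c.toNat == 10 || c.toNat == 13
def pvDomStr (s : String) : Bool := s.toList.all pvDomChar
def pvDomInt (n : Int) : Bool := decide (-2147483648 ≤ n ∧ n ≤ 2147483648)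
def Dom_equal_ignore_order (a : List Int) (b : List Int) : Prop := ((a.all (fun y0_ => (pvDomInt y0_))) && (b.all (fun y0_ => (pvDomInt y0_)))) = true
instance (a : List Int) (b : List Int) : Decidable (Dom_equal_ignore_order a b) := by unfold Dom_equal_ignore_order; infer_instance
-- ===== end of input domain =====

-- B replaces A's copy-and-remove loop (with exception-based early exit) by a pure
-- length check plus equality-based counting; return-value equivalence (A mutates only its local copy).

-- ===== PORT A =====
-- the for-loop over a, carrying the mutable 'unmatched' list; ValueError (remove? = none) → return False
def eioLoop : List Int → List Int → Bool
  | [], unmatched => unmatched.isEmpty          -- 'return not unmatched'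
  | x :: rest, unmatched =>
    match PySem.List.remove? unmatched x with
    | none => false
    | some u => eioLoop rest u

def equal_ignore_order (a : List Int) (b : List Int) : Bool :=
  eioLoop a b

-- ===== PORT B =====
def equal_ignore_order_alt (a : List Int) (b : List Int) : Bool :=
  if a.length ≠ b.length then false
  else a.all (fun x => PySem.List.count a x == PySem.List.count b x)

-- ===== PRECONDITION & SPEC =====
def Spec_equal_ignore_order (a : List Int) (b : List Int) (out : Bool) : Prop := out = equal_ignore_order_alt a b
instance (a : List Int) (b : List Int) (out : Bool) : Decidable (Spec_equal_ignore_order a b out) := by unfold Spec_equal_ignore_order; infer_instance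

-- ===== CLAIM (what is proved, stated in full; the proofs are below) =====
def Claim_equal_equal_ignore_order : Prop := ∀ (a : List Int) (b : List Int), Dom_equal_ignore_order a b → Spec_equal_ignore_order a b (equal_ignore_order a b)

-- ===== LEMMAS AND PROOFS =====

theorem eioLoop_iff_perm (a : List Int) : ∀ u : List Int, eioLoop a u = true ↔ a.Perm u := by
  induction a with
  | nil =>
    intro u
    simp only [eioLoop, List.isEmpty_iff]
    constructor
    · intro h; simp [h]
    · intro h; exact (List.Perm.nil_eq h).symm
  | cons x rest ih =>
    intro u
    by_cases hx : x ∈ u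
    · rw [show eioLoop (x :: rest) u = eioLoop rest (u.erase x) by
        simp [eioLoop, PySem.List.remove?_eq_some_erase u x hx]]
      rw [ih, List.cons_perm_iff_perm_erase]
      simp [hx]
    · have : PySem.List.remove? u x = none := (PySem.List.remove?_eq_none_iff u x).mpr hx
      simp [eioLoop, this]
      intro h
      exact hx (h.mem_iff.mp (List.mem_cons_self))

theorem alt_iff_perm (a b : List Int) : equal_ignore_order_alt a b = true ↔ a.Perm b := by
  unfold equal_ignore_order_alt
  split_ifs with hlen
  · simp only [false_iff]
    intro h; exact hlen h.length_eq
  · rw [not_ne_iff] at hlen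
    simp only [List.all_eq_true, beq_iff_eq, PySem.List.count_eq]
    constructor
    · intro h
      rw [List.perm_iff_count]
      have hle : (↑a : Multiset Int) ≤ (↑b : Multiset Int) := by
        rw [Multiset.le_iff_count]
        intro y
        simp only [Multiset.coe_count]
        by_cases hy : y ∈ a
        · exact le_of_eq (h y hy)
        · simp [List.count_eq_zero_of_not_mem hy]
      have hcard : Multiset.card (↑b : Multiset Int) ≤ Multiset.card (↑a : Multiset Int) := by
        simp [hlen]
      have heq : (↑a : Multiset Int) = (↑b : Multiset Int) := Multiset.eq_of_le_of_card_le hle hcard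
      intro y
      have := congrArg (Multiset.count y) heq
      simpa [Multiset.coe_count] using this
    · intro h y _
      exact (List.perm_iff_count.mp h) y

-- ===== VERDICT (by name: the statement is the Claim_ definition above) =====
theorem equal_ignore_order_spec : Claim_equal_equal_ignore_order := by
  intro a b _
  unfold Spec_equal_ignore_order
  by_cases h : a.Perm b
  · rw [show equal_ignore_order a b = true from (eioLoop_iff_perm a b).mpr h,
        (alt_iff_perm a b).mpr h]
  · have h1 : equal_ignore_order a b ≠ true := fun hc => h ((eioLoop_iff_perm a b).mp hc)
    have h2 : equal_ignore_order_alt a b ≠ true := fun hc => h ((alt_iff_perm a b).mp hc)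
    simp only [Bool.not_eq_true] at h1 h2
    rw [h1, h2]
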